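-- pv_equiv track=rewrite | github.com/Adarshb2000/coding | COMPILER.py | compiler
-- ===== SOURCE A (Python) =====
-- def compiler(string):
--     brackets = 0
--     opens = []
--     for i, bracket in enumerate(string):
--         if bracket == '<':
--             brackets += 1
--             opens.append(i)
--         else:
--             if brackets:
--                 brackets -= 1
--                 opens.pop()
--             else:
--                 return i
--
--     if len(opens):
--         return opens[0]
--
--     return len(string)
-- ===== SOURCE B (Python) =====
-- def compiler(string):
--     # Prefix sums: +1 for '<', -1 for any other (closing) character.
--     P = [0]
--     for ch in string:
--         P.append(P[-1] + (1 if ch == '<' else -1))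
--     # First dip below zero = first closing character with nothing open.
--     for i, p in enumerate(P[1:]):
--         if p < 0:
--             return i
--     # Fully balanced: everything matched.
--     if P[-1] == 0:
--         return len(string)
--     # Leftover opens: the first of them sits at the last index whose
--     # prefix sum is zero (a '<' opened there and was never re-closed).
--     last = 0
--     for i, p in enumerate(P[:-1]):
--         if p == 0:
--             last = i
--     return last
-- ===== Notes on version B (the rewrite author's own statement) =====
-- stated objective: alternative
-- what changed: Replaces A's online stack simulation with a staged prefix-sum characterization: build the +1/-1 prefix-sum array once, then the answer is the first index where the sum dips below zero, or len(string) if the total is zero, or otherwise the last index whose prefix sum is zero (the first leftover '<'); no stack and no mutable counter-driven branching.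
import Mathlib
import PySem

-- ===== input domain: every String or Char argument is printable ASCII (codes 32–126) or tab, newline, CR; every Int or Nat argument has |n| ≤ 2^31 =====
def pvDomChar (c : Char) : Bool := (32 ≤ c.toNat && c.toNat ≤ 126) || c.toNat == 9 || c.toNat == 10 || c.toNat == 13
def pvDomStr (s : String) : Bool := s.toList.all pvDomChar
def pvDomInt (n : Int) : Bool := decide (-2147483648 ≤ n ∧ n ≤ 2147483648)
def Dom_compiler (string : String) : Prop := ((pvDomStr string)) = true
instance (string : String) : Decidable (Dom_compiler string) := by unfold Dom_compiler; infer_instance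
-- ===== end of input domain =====

-- B replaces A's online stack simulation with a staged prefix-sum characterization
-- (first dip below zero / total zero / last zero of the prefix-sum array); objective: alternative.

-- ===== PORT A =====
-- A's loop: state is the counter `brackets` and the stack `opens` (append at end, pop at end).
-- `.inl i` is the early `return i`; `.inr opens` is falling off the loop.
def compilerAuxA (cs : List Char) (i : Int) (brackets : Int) (opens : List Int) : Int ⊕ List Int :=
  match cs with
  | [] => .inr opens
  | c :: rest =>
    if c = '<' then compilerAuxA rest (i + 1) (brackets + 1) (opens ++ [i])
    else if brackets ≠ 0 then compilerAuxA rest (i + 1) (brackets - 1) opens.dropLast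
    else .inl i

def compiler (string : String) : Int :=
  match compilerAuxA string.toList 0 0 [] with
  | .inl i => i
  | .inr opens =>
    match opens with
    | [] => (string.toList.length : Int)   -- len(opens) == 0: return len(string)
    | o :: _ => o                          -- opens[0]

-- ===== PORT B =====
-- `P = [0]; for ch: P.append(P[-1] + ±1)` — builds P[1..n], carrying P[-1] in `p`.
def buildP (cs : List Char) (p : Int) : List Int :=
  match cs with
  | [] => []
  | c :: rest =>
    let p' := p + (if c = '<' then 1 else -1)
    p' :: buildP rest p'

-- `for i, p in enumerate(P[1:]): if p < 0: return i`
def firstDip (ps : List Int) (i : Int) : Option Int :=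
  match ps with
  | [] => none
  | p :: rest => if p < 0 then some i else firstDip rest (i + 1)

-- `last = 0; for i, p in enumerate(P[:-1]): if p == 0: last = i`
def lastZero (ps : List Int) (i : Int) (last : Int) : Int :=
  match ps with
  | [] => last
  | p :: rest => lastZero rest (i + 1) (if p = 0 then i else last)

def compiler_alt (string : String) : Int :=
  let ps := buildP string.toList 0            -- P[1:], so full P = 0 :: ps
  match firstDip ps 0 with
  | some i => i
  | none =>
    if ps.getLastD 0 = 0 then (string.toList.length : Int)   -- P[-1] == 0
    else lastZero (((0 : Int) :: ps).dropLast) 0 0           -- last zero of P[:-1]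

-- ===== PRECONDITION & SPEC =====
def Spec_compiler (string : String) (out : Int) : Prop := out = compiler_alt string
instance (string : String) (out : Int) : Decidable (Spec_compiler string out) := by unfold Spec_compiler; infer_instance

-- ===== CLAIM (what is proved, stated in full; the proofs are below) =====
def Claim_equal_compiler : Prop := ∀ (string : String), Dom_compiler string → Spec_compiler string (compiler string)

-- ===== LEMMAS AND PROOFS =====

/-- Proof-only intermediate one-pass loop: integer balance plus the saved index where
the balance last rose from 0.  It bridges A's stack and B's prefix-sum passes. -/
def onePass (cs : List Char) (i : Int) (balance : Int) (start : Int) : Int ⊕ (Int × Int) :=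
  match cs with
  | [] => .inr (balance, start)
  | c :: rest =>
    if c = '<' then onePass rest (i + 1) (balance + 1) (if balance = 0 then i else start)
    else if balance > 0 then onePass rest (i + 1) (balance - 1) start
    else .inl i

/-- Relation between A's loop result and the one-pass result: early returns agree;
on normal exit, the balance is the stack length and start is the bottom of a nonempty stack. -/
def loopRel : (Int ⊕ List Int) → (Int ⊕ (Int × Int)) → Prop
  | .inl a, .inl b => a = b
  | .inr opens, .inr (bal, st) => bal = (opens.length : Int) ∧ (opens ≠ [] → opens.head? = some st)
  | _, _ => False

theorem loop_rel (cs : List Char) : ∀ (i start : Int) (opens : List Int),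
    (opens ≠ [] → opens.head? = some start) →
    loopRel (compilerAuxA cs i (opens.length : Int) opens) (onePass cs i (opens.length : Int) start) := by
  induction cs with
  | nil =>
    intro i start opens h
    simp only [compilerAuxA, onePass, loopRel]
    exact ⟨trivial, h⟩
  | cons c rest ih =>
    intro i start opens h
    by_cases hc : c = '<'
    · have hlen : ((opens ++ [i]).length : Int) = (opens.length : Int) + 1 := by simp
      have hhead : (opens ++ [i]) ≠ [] → (opens ++ [i]).head? = some (if (opens.length : Int) = 0 then i else start) := by
        intro _
        cases opens with
        | nil => simp
        | cons o os =>
          have : ((o :: os).length : Int) ≠ 0 := by simp only [List.length_cons]; push_cast; omega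
          simp
          have := h (by simp)
          simpa using this
      have := ih (i + 1) (if (opens.length : Int) = 0 then i else start) (opens ++ [i]) hhead
      simpa [compilerAuxA, onePass, hc, hlen] using this
    · cases opens with
      | nil => simp [compilerAuxA, onePass, hc, loopRel]
      | cons o os =>
        have hne : ((o :: os).length : Int) ≠ 0 := by simp only [List.length_cons]; push_cast; omega
        have hpos : ((o :: os).length : Int) > 0 := by exact_mod_cast Nat.succ_pos os.length
        have hlen : ((o :: os).length : Int) - 1 = (((o :: os).dropLast).length : Int) := by simp
        have hhead : ((o :: os).dropLast) ≠ [] → ((o :: os).dropLast).head? = some start := by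
          intro hne2
          cases os with
          | nil => simp at hne2
          | cons o2 os2 =>
            have := h (by simp)
            simp at this
            simp [List.dropLast, this]
        have := ih (i + 1) start ((o :: os).dropLast) hhead
        rw [hlen] at *
        simpa [compilerAuxA, onePass, hc, hne, hpos, hlen] using this

/-- Total delta of a character list. -/
def sumD (cs : List Char) : Int :=
  match cs with
  | [] => 0
  | c :: rest => (if c = '<' then 1 else -1) + sumD rest

theorem getLastD_buildP (cs : List Char) : ∀ (p : Int), (buildP cs p).getLastD p = p + sumD cs := by
  induction cs with
  | nil => intro p; simp [buildP, sumD]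
  | cons c rest ih =>
    intro p
    simp only [buildP, sumD, List.getLastD_cons, ih]
    ring

/-- `(a :: b :: l).dropLast = a :: (b :: l).dropLast`, used to peel the head of `P[:-1]`. -/
theorem dropLast_cons2 (a b : Int) (l : List Int) : (a :: b :: l).dropLast = a :: (b :: l).dropLast := rfl

/-- Characterization of the one-pass loop by B's staged passes. -/
theorem onePass_char (cs : List Char) : ∀ (i bal st : Int), 0 ≤ bal →
    onePass cs i bal st =
      (match firstDip (buildP cs bal) i with
       | some j => Sum.inl j
       | none => Sum.inr (bal + sumD cs, lastZero ((bal :: buildP cs bal).dropLast) i st)) := by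
  induction cs with
  | nil => intro i bal st _; simp [onePass, buildP, firstDip, lastZero, sumD]
  | cons c rest ih =>
    intro i bal st hbal
    by_cases hc : c = '<'
    · have hnd : ¬ (bal + 1 < 0) := by omega
      have hrec := ih (i + 1) (bal + 1) (if bal = 0 then i else st) (by omega)
      simp only [onePass, buildP, firstDip, sumD, hc, if_true, hnd, dropLast_cons2, lastZero]
      rw [hrec, show bal + 1 + sumD rest = bal + (1 + sumD rest) by ring]
      simp
    · by_cases hpos : bal > 0
      · have hbne : ¬ (bal = 0) := by omega
        have hnlt : ¬ (bal - 1 < 0) := by omega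
        have hrec := ih (i + 1) (bal - 1) st (by omega)
        simp only [onePass, buildP, firstDip, sumD, hc, if_false, hpos, if_true,
          show bal + -1 = bal - 1 by ring, hnlt, dropLast_cons2, lastZero, hbne]
        rw [hrec, show bal - 1 + sumD rest = bal + (-1 + sumD rest) by ring]
      · have hb0 : bal = 0 := by omega
        simp [onePass, buildP, firstDip, hc, hb0]

theorem compiler_eq (string : String) : compiler string = compiler_alt string := by
  have hA := loop_rel string.toList 0 0 [] (by simp)
  simp only [List.length_nil, Nat.cast_zero] at hA
  have hB := onePass_char string.toList 0 0 0 (le_refl 0)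
  unfold compiler compiler_alt
  cases hfd : firstDip (buildP string.toList 0) 0 with
  | some j =>
    simp only [hfd] at hB ⊢
    rw [hB] at hA
    cases hAr : compilerAuxA string.toList 0 0 [] with
    | inl a => rw [hAr] at hA; simpa [loopRel] using hA
    | inr opens => rw [hAr] at hA; simp [loopRel] at hA
  | none =>
    simp only [hfd] at hB ⊢
    rw [hB] at hA
    have hlast : (buildP string.toList 0).getLastD 0 = sumD string.toList := by
      have := getLastD_buildP string.toList 0
      omega
    cases hAr : compilerAuxA string.toList 0 0 [] with
    | inl a => rw [hAr] at hA; simp [loopRel] at hA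
    | inr opens =>
      rw [hAr] at hA
      obtain ⟨hbal, hst⟩ := hA
      cases opens with
      | nil =>
        simp only [List.length_nil, Nat.cast_zero] at hbal
        have h0 : (buildP string.toList 0).getLastD 0 = 0 := by omega
        simp only [h0, if_true]
      | cons o os =>
        have hlenpos : (0 : Int) < ((o :: os).length : Int) := by exact_mod_cast Nat.succ_pos os.length
        have hne0 : ¬ ((buildP string.toList 0).getLastD 0 = 0) := by omega
        have ho := hst (by simp)
        simp only [List.head?_cons, Option.some.injEq] at ho
        simp only [hne0, if_false, ho]

-- ===== VERDICT (by name: the statement is the Claim_ definition above) =====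
theorem compiler_spec : Claim_equal_compiler := by
  intro s _
  unfold Spec_compiler
  exact compiler_eq s
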